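-- pv_equiv track=rewrite | github.com/godzig/ecosystem-game | ecosystem.py | deerLines
-- ===== SOURCE A (Python) =====
-- def deerLines(board, positions):
-- 	rows = [set([0,1,2,3,4]), set([5,6,7,8,9]), set([10,11,12,13,14]), set([15,16,17,18,19])]
-- 	cols = [set([0,5,10,15]), set([1,6,11,16]), set([2,7,12,17]), set([3,8,13,18]), set([4,9,14,19])]
-- 	count = 0
-- 	for row in rows:
-- 		if set(positions) & row:
-- 			count += 1
-- 	for col in cols:
-- 		if set(positions) & col:
-- 			count += 1
-- 	return count
-- ===== SOURCE B (Python) =====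
-- def deerLines(board, positions):
-- 	on_board = [p for p in positions if 0 <= p <= 19]
-- 	occupied_rows = {p // 5 for p in on_board}
-- 	occupied_cols = {p % 5 for p in on_board}
-- 	return len(occupied_rows) + len(occupied_cols)
-- ===== Notes on version B (the rewrite author's own statement) =====
-- stated objective: simpler
-- what changed: B replaces the nine precomputed row/column index-sets and nine set-intersection tests by one pass that derives each on-board position's row p//5 and column p%5 arithmetically and returns the sizes of the two distinct-value sets.
import Mathlib
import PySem

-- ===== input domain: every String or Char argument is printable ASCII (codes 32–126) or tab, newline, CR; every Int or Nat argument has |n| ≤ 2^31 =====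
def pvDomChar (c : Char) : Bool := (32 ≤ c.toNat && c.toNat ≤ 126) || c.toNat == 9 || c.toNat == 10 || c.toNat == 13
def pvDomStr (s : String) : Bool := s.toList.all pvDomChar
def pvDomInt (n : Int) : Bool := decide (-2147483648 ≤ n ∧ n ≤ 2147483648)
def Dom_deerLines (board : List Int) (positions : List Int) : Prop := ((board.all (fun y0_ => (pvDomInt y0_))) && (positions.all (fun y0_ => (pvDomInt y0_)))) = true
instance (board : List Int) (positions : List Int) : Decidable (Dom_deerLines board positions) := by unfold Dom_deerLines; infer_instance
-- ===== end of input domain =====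

-- B counts occupied rows/columns by deriving p//5 and p%5 per position instead of
-- intersecting set(positions) with nine precomputed index-sets (objective: simpler).

-- ===== PORT A =====
def deerLines (board : List Int) (positions : List Int) : Int :=
  let rows : List (PySem.Set Int) :=
    [PySem.Set.ofList [0,1,2,3,4], PySem.Set.ofList [5,6,7,8,9],
     PySem.Set.ofList [10,11,12,13,14], PySem.Set.ofList [15,16,17,18,19]]
  let cols : List (PySem.Set Int) :=
    [PySem.Set.ofList [0,5,10,15], PySem.Set.ofList [1,6,11,16],
     PySem.Set.ofList [2,7,12,17], PySem.Set.ofList [3,8,13,18],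
     PySem.Set.ofList [4,9,14,19]]
  let count : Int := rows.foldl
    (fun c row => if (PySem.Set.inter (PySem.Set.ofList positions) row).isEmpty then c else c + 1) 0
  cols.foldl
    (fun c col => if (PySem.Set.inter (PySem.Set.ofList positions) col).isEmpty then c else c + 1) count

-- ===== PORT B =====
def deerLines_alt (board : List Int) (positions : List Int) : Int :=
  let onBoard := positions.filter (fun p => decide (0 ≤ p) && decide (p ≤ 19))
  let occRows : PySem.Set Int := PySem.Set.ofList (onBoard.map (fun p => PySem.Int.floordiv p 5))
  let occCols : PySem.Set Int := PySem.Set.ofList (onBoard.map (fun p => PySem.Int.mod p 5))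
  occRows.len + occCols.len

-- ===== PRECONDITION & SPEC =====
def Spec_deerLines (board : List Int) (positions : List Int) (out : Int) : Prop := out = deerLines_alt board positions
instance (board : List Int) (positions : List Int) (out : Int) : Decidable (Spec_deerLines board positions out) := by unfold Spec_deerLines; infer_instance

-- ===== CLAIM (what is proved, stated in full; the proofs are below) =====
def Claim_equal_deerLines : Prop := ∀ (board : List Int) (positions : List Int), Dom_deerLines board positions → Spec_deerLines board positions (deerLines board positions)

-- ===== LEMMAS AND PROOFS =====

-- A nodup list with the same members as PySem.Set.ofList L, filtered from a nodup universe S ⊇ L,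
-- has the same length.
lemma len_ofList_eq_filter (L S : List Int) (hS : S.Nodup) (hsub : ∀ x ∈ L, x ∈ S) :
    (PySem.Set.ofList L).length = (S.filter (fun x => decide (x ∈ L))).length := by
  apply List.Perm.length_eq
  rw [List.perm_ext_iff_of_nodup (PySem.Set.nodup_ofList L) (hS.filter _)]
  intro a
  simp only [PySem.Set.mem_ofList, List.mem_filter, decide_eq_true_eq]
  exact ⟨fun h => ⟨hsub a h, h⟩, fun h => h.2⟩

lemma bool_of_iff {b : Bool} {P : Prop} [Decidable P] (h : b = false ↔ P) : b = !decide P := by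
  by_cases hp : P
  · simp [hp, h.mpr hp]
  · cases hb : b
    · exact absurd (h.mp hb) hp
    · simp [hp]

-- "set(positions) & row_i is nonempty" ↔ "row index i occurs among p//5 of the on-board positions"
lemma hit_row (positions : List Int) (i : Int) (h0 : 0 ≤ i) (h3 : i ≤ 3) :
    ((PySem.Set.inter (PySem.Set.ofList positions)
        (PySem.Set.ofList [5*i, 5*i+1, 5*i+2, 5*i+3, 5*i+4])).isEmpty = false)
    ↔ i ∈ (positions.filter (fun p => decide (0 ≤ p) && decide (p ≤ 19))).map
            (fun p => PySem.Int.floordiv p 5) := by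
  simp only [PySem.Set.inter, PySem.Set.contains, List.isEmpty_eq_false_iff,
    ne_eq, List.filter_eq_nil_iff, not_forall, List.mem_map, List.mem_filter,
    Bool.and_eq_true, decide_eq_true_eq, not_not,
    List.elem_eq_mem, PySem.Set.mem_ofList]
  constructor
  · rintro ⟨p, hp, hmem⟩
    simp only [List.mem_cons, List.not_mem_nil, or_false] at hmem
    refine ⟨p, ⟨hp, by omega, by omega⟩, ?_⟩
    rw [PySem.Int.floordiv_eq_iff_of_pos (by norm_num)]
    omega
  · rintro ⟨p, ⟨hp, hp0, hp19⟩, hdiv⟩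
    rw [PySem.Int.floordiv_eq_iff_of_pos (by norm_num)] at hdiv
    refine ⟨p, hp, ?_⟩
    simp only [List.mem_cons, List.not_mem_nil, or_false]
    omega

-- "set(positions) & col_i is nonempty" ↔ "column index i occurs among p%5 of the on-board positions"
lemma hit_col (positions : List Int) (i : Int) (h0 : 0 ≤ i) (h4 : i ≤ 4) :
    ((PySem.Set.inter (PySem.Set.ofList positions)
        (PySem.Set.ofList [i, i+5, i+10, i+15])).isEmpty = false)
    ↔ i ∈ (positions.filter (fun p => decide (0 ≤ p) && decide (p ≤ 19))).map
            (fun p => PySem.Int.mod p 5) := by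
  simp only [PySem.Set.inter, PySem.Set.contains, List.isEmpty_eq_false_iff,
    ne_eq, List.filter_eq_nil_iff, not_forall, List.mem_map, List.mem_filter,
    Bool.and_eq_true, decide_eq_true_eq, not_not,
    List.elem_eq_mem, PySem.Set.mem_ofList]
  constructor
  · rintro ⟨p, hp, hmem⟩
    simp only [List.mem_cons, List.not_mem_nil, or_false] at hmem
    have hq := PySem.Int.floordiv_mul_add_mod p 5
    have hm0 := PySem.Int.mod_nonneg p (b := 5) (by norm_num)
    have hm5 := PySem.Int.mod_lt p (b := 5) (by norm_num)
    exact ⟨p, ⟨hp, by omega, by omega⟩, by omega⟩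
  · rintro ⟨p, ⟨hp, hp0, hp19⟩, hmod⟩
    have hq := PySem.Int.floordiv_mul_add_mod p 5
    have hd0 : 0 ≤ PySem.Int.floordiv p 5 := by
      rw [PySem.Int.le_floordiv_iff_mul_le (by norm_num)]; omega
    have hd4 : PySem.Int.floordiv p 5 < 4 := by
      rw [PySem.Int.floordiv_lt_iff_lt_mul (by norm_num)]; omega
    refine ⟨p, hp, ?_⟩
    simp only [List.mem_cons, List.not_mem_nil, or_false]
    omega

lemma ite_not_step (d : Bool) (c : Int) : (if (!d) = true then c else c + 1) = c + (if d = true then 1 else 0) := by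
  cases d <;> simp

lemma length_filter_four (p : Int → Bool) :
    (([0,1,2,3] : List Int).filter p).length =
      (if p 0 then 1 else 0) + (if p 1 then 1 else 0) + (if p 2 then 1 else 0) + (if p 3 then 1 else 0) := by
  cases h0 : p 0 <;> cases h1 : p 1 <;> cases h2 : p 2 <;> cases h3 : p 3 <;>
    simp [List.filter, h0, h1, h2, h3]

lemma length_filter_five (p : Int → Bool) :
    (([0,1,2,3,4] : List Int).filter p).length =
      (if p 0 then 1 else 0) + (if p 1 then 1 else 0) + (if p 2 then 1 else 0) +
        (if p 3 then 1 else 0) + (if p 4 then 1 else 0) := by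
  cases h0 : p 0 <;> cases h1 : p 1 <;> cases h2 : p 2 <;> cases h3 : p 3 <;> cases h4 : p 4 <;>
    simp [List.filter, h0, h1, h2, h3, h4]

-- ===== VERDICT (by name: the statement is the Claim_ definition above) =====
theorem deerLines_spec : Claim_equal_deerLines := by
  intro board positions _
  unfold Spec_deerLines deerLines deerLines_alt
  simp only []
  set Lr := (positions.filter (fun p => decide (0 ≤ p) && decide (p ≤ 19))).map
      (fun p => PySem.Int.floordiv p 5) with hLr
  set Lc := (positions.filter (fun p => decide (0 ≤ p) && decide (p ≤ 19))).map
      (fun p => PySem.Int.mod p 5) with hLc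
  have hlenr : (PySem.Set.ofList Lr).length = ([0,1,2,3].filter (fun x => decide (x ∈ Lr))).length := by
    refine len_ofList_eq_filter _ _ (by decide) ?_
    intro x hx
    rw [hLr] at hx
    simp only [List.mem_map, List.mem_filter, Bool.and_eq_true, decide_eq_true_eq] at hx
    obtain ⟨p, ⟨_, hp0, hp19⟩, rfl⟩ := hx
    have hd0 : 0 ≤ PySem.Int.floordiv p 5 := by
      rw [PySem.Int.le_floordiv_iff_mul_le (by norm_num)]; omega
    have hd4 : PySem.Int.floordiv p 5 < 4 := by
      rw [PySem.Int.floordiv_lt_iff_lt_mul (by norm_num)]; omega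
    simp only [List.mem_cons, List.not_mem_nil, or_false]; omega
  have hlenc : (PySem.Set.ofList Lc).length = ([0,1,2,3,4].filter (fun x => decide (x ∈ Lc))).length := by
    refine len_ofList_eq_filter _ _ (by decide) ?_
    intro x hx
    rw [hLc] at hx
    simp only [List.mem_map, List.mem_filter, Bool.and_eq_true, decide_eq_true_eq] at hx
    obtain ⟨p, ⟨_, hp0, hp19⟩, rfl⟩ := hx
    have hm0 := PySem.Int.mod_nonneg p (b := 5) (by norm_num)
    have hm5 := PySem.Int.mod_lt p (b := 5) (by norm_num)
    simp only [List.mem_cons, List.not_mem_nil, or_false]; omega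
  have r0 := bool_of_iff (hit_row positions 0 (by norm_num) (by norm_num))
  have r1 := bool_of_iff (hit_row positions 1 (by norm_num) (by norm_num))
  have r2 := bool_of_iff (hit_row positions 2 (by norm_num) (by norm_num))
  have r3 := bool_of_iff (hit_row positions 3 (by norm_num) (by norm_num))
  have c0 := bool_of_iff (hit_col positions 0 (by norm_num) (by norm_num))
  have c1 := bool_of_iff (hit_col positions 1 (by norm_num) (by norm_num))
  have c2 := bool_of_iff (hit_col positions 2 (by norm_num) (by norm_num))
  have c3 := bool_of_iff (hit_col positions 3 (by norm_num) (by norm_num))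
  have c4 := bool_of_iff (hit_col positions 4 (by norm_num) (by norm_num))
  norm_num [← hLr, ← hLc] at r0 r1 r2 r3 c0 c1 c2 c3 c4
  simp only [List.foldl, PySem.Set.len_eq, hlenr, hlenc, r0, r1, r2, r3, c0, c1, c2, c3, c4,
    length_filter_four, length_filter_five, ite_not_step]
  push_cast
  ring
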